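-- pv_equiv track=rewrite | github.com/melisasvr/Deep-Research-Agent-MCP-Server | server.py | _infer_cluster_label
-- ===== SOURCE A (Python) =====
-- def _infer_cluster_label(keywords: list[str]) -> str:
--     """Map top keywords to a human-readable cluster label."""
--     kw_set = set(keywords[:8])
--
--     LABEL_MAP = [
--         # Energy & power
--         ({"energy","power","electricity","grid","consumption","demand","twh","kwh","megawatt","gigawatt","load","utility"}, "Energy Demand & Grid"),
--         # Water
--         ({"water","cooling","thermal","liquid","immersion","heat","evaporation","drought","reservoir","gallons","cubic"}, "Cooling & Water Use"),
--         # Climate / renewables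
--         ({"nuclear","renewable","solar","wind","carbon","emissions","clean","green","climate","sustainability","net","zero"}, "Clean Energy & Sustainability"),
--         # Infrastructure
--         ({"data","center","infrastructure","cloud","server","hardware","rack","facility","hyperscale","campus"}, "Data Center Infrastructure"),
--         # AI / compute
--         ({"ai","model","training","inference","llm","gpu","compute","nvidia","chip","accelerator","transformer","language"}, "AI Compute & Models"),
--         # Quantum
--         ({"quantum","qubit","qubits","superposition","entanglement","decoherence","fault","logical","error","correction","ibm","google"}, "Quantum Computing"),
--         # Biotech / health
--         ({"drug","protein","gene","genome","clinical","trial","cancer","therapy","mrna","vaccine","biotech","pharma","disease"}, "Biotech & Health"),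
--         # Policy / regulation
--         ({"policy","regulation","government","law","standard","congress","eu","act","bill","rule","compliance","regulatory"}, "Policy & Regulation"),
--         # Market / finance
--         ({"market","billion","million","investment","revenue","funding","startup","ipo","valuation","growth","percent","forecast"}, "Market & Economic Trends"),
--         # Security / cyber
--         ({"security","cyber","attack","breach","vulnerability","encryption","threat","malware","ransomware","phishing"}, "Cybersecurity"),
--         # Space
--         ({"space","satellite","rocket","orbit","nasa","spacex","lunar","mars","launch","payload","constellation"}, "Space Technology"),
--         # Robotics / automation
--         ({"robot","autonomous","automation","drone","vehicle","manufacturing","warehouse","arm","sensor","lidar"}, "Robotics & Automation"),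
--         # Research / science
--         ({"research","study","paper","journal","university","laboratory","experiment","discovery","breakthrough","findings"}, "Research & Science"),
--     ]
--
--     best_label, best_score = "Emerging Trends", 0
--     for key_terms, label in LABEL_MAP:
--         score = len(kw_set & key_terms)
--         if score > best_score:
--             best_score, best_label = score, label
--
--     # Fallback: build label from top 2 meaningful keywords
--     if best_score == 0 and keywords:
--         clean = [k for k in keywords if len(k) > 4][:2]
--         if clean:
--             return " & ".join(w.title() for w in clean)
--
--     return best_label
-- ===== SOURCE B (Python) =====
-- def _infer_cluster_label(keywords: list[str]) -> str:
--     """Map top keywords to a human-readable cluster label."""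
--     LABEL_MAP = [
--         ("energy power electricity grid consumption demand twh kwh megawatt gigawatt load utility", "Energy Demand & Grid"),
--         ("water cooling thermal liquid immersion heat evaporation drought reservoir gallons cubic", "Cooling & Water Use"),
--         ("nuclear renewable solar wind carbon emissions clean green climate sustainability net zero", "Clean Energy & Sustainability"),
--         ("data center infrastructure cloud server hardware rack facility hyperscale campus", "Data Center Infrastructure"),
--         ("ai model training inference llm gpu compute nvidia chip accelerator transformer language", "AI Compute & Models"),
--         ("quantum qubit qubits superposition entanglement decoherence fault logical error correction ibm google", "Quantum Computing"),
--         ("drug protein gene genome clinical trial cancer therapy mrna vaccine biotech pharma disease", "Biotech & Health"),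
--         ("policy regulation government law standard congress eu act bill rule compliance regulatory", "Policy & Regulation"),
--         ("market billion million investment revenue funding startup ipo valuation growth percent forecast", "Market & Economic Trends"),
--         ("security cyber attack breach vulnerability encryption threat malware ransomware phishing", "Cybersecurity"),
--         ("space satellite rocket orbit nasa spacex lunar mars launch payload constellation", "Space Technology"),
--         ("robot autonomous automation drone vehicle manufacturing warehouse arm sensor lidar", "Robotics & Automation"),
--         ("research study paper journal university laboratory experiment discovery breakthrough findings", "Research & Science"),
--     ]
--
--     # inverted index built once: term -> every label whose term set contains it
--     index = {}
--     for terms, label in LABEL_MAP: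
--         for t in terms.split():
--             index.setdefault(t, []).append(label)
--
--     # one vote per distinct keyword among the first 8
--     counts = {}
--     for kw in set(keywords[:8]):
--         for label in index.get(kw, ()):
--             counts[label] = counts.get(label, 0) + 1
--
--     # winner: maximum vote count, first label (LABEL_MAP order) attaining it
--     scores = [counts.get(label, 0) for _, label in LABEL_MAP]
--     best = max(scores, default=0)
--     if best > 0:
--         for (_, label), s in zip(LABEL_MAP, scores):
--             if s == best:
--                 return label
--
--     # fallback: build label from top 2 meaningful keywords
--     if keywords:
--         clean = [k for k in keywords if len(k) > 4][:2]
--         if clean: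
--             return " & ".join(w.title() for w in clean)
--     return "Emerging Trends"
-- ===== Notes on version B (the rewrite author's own statement) =====
-- stated objective: alternative
-- what changed: B stores the vocabulary as flat whitespace-separated term strings split at use, builds an inverted index (term -> labels) once and tallies per-label votes in one pass over the distinct first-8 keywords, then picks the winner by max score plus first-match scan, instead of A's 13 per-label set intersections with a running first-strict-winner fold; the best==0 fallback is unchanged.
import Mathlib
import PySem

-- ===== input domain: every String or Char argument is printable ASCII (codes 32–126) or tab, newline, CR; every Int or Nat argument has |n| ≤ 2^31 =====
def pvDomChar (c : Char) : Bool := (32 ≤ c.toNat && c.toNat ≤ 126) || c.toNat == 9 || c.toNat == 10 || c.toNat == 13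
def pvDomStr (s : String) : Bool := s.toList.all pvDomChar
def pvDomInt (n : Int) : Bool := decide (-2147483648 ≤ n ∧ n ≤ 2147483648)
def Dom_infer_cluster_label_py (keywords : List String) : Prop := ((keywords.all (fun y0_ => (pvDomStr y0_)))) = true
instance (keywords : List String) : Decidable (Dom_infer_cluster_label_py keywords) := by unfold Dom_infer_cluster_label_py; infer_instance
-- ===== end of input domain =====

-- B replaces A's 13 per-label set intersections by an inverted index (term → labels) built from a
-- flat whitespace-separated term table, a single vote-tally pass over the distinct first-8 keywords,
-- and a max-then-first-match winner scan; same fallback (alternative, not claimed faster).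

-- ===== PORT A =====
-- A's LABEL_MAP (each Python set literal as its distinct-element list)
def pvLabelMap : List (List String × String) := [
  (["energy","power","electricity","grid","consumption","demand","twh","kwh","megawatt","gigawatt","load","utility"], "Energy Demand & Grid"),
  (["water","cooling","thermal","liquid","immersion","heat","evaporation","drought","reservoir","gallons","cubic"], "Cooling & Water Use"),
  (["nuclear","renewable","solar","wind","carbon","emissions","clean","green","climate","sustainability","net","zero"], "Clean Energy & Sustainability"),
  (["data","center","infrastructure","cloud","server","hardware","rack","facility","hyperscale","campus"], "Data Center Infrastructure"),
  (["ai","model","training","inference","llm","gpu","compute","nvidia","chip","accelerator","transformer","language"], "AI Compute & Models"),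
  (["quantum","qubit","qubits","superposition","entanglement","decoherence","fault","logical","error","correction","ibm","google"], "Quantum Computing"),
  (["drug","protein","gene","genome","clinical","trial","cancer","therapy","mrna","vaccine","biotech","pharma","disease"], "Biotech & Health"),
  (["policy","regulation","government","law","standard","congress","eu","act","bill","rule","compliance","regulatory"], "Policy & Regulation"),
  (["market","billion","million","investment","revenue","funding","startup","ipo","valuation","growth","percent","forecast"], "Market & Economic Trends"),
  (["security","cyber","attack","breach","vulnerability","encryption","threat","malware","ransomware","phishing"], "Cybersecurity"),
  (["space","satellite","rocket","orbit","nasa","spacex","lunar","mars","launch","payload","constellation"], "Space Technology"),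
  (["robot","autonomous","automation","drone","vehicle","manufacturing","warehouse","arm","sensor","lidar"], "Robotics & Automation"),
  (["research","study","paper","journal","university","laboratory","experiment","discovery","breakthrough","findings"], "Research & Science")]

def pvTitleChars : List Char → Bool → List Char
  | [], _ => []
  | c :: rest, prevAlpha =>
    if c.isAlpha then (if prevAlpha then c.toLower else c.toUpper) :: pvTitleChars rest true
    else c :: pvTitleChars rest false

-- hand port of str.title(): a letter is uppercased iff the previous character is not a
-- letter, else lowercased; exact on the ASCII domain (where 'cased' = letter)
def pvTitle (s : String) : String := String.ofList (pvTitleChars s.toList false)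

def infer_cluster_label_py (keywords : List String) : String :=
  let kwSet : PySem.Set String := PySem.Set.ofList (PySem.List.slice keywords none (some 8))
  let best := pvLabelMap.foldl
    (fun (st : String × Int) p =>
      let score : Int := PySem.Set.len (PySem.Set.inter kwSet p.1)
      if st.2 < score then (p.2, score) else st)
    ("Emerging Trends", 0)
  if best.2 = 0 ∧ keywords ≠ [] then
    let clean := PySem.List.slice (keywords.filter (fun k => 4 < PySem.Str.len k)) none (some 2)
    if clean ≠ [] then PySem.Str.join " & " (clean.map pvTitle) else best.1
  else best.1

-- ===== PORT B =====
-- B's flat table: whitespace-separated term string per label, split at use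
def pvLabelMapB : List (String × String) := [
  ("energy power electricity grid consumption demand twh kwh megawatt gigawatt load utility", "Energy Demand & Grid"),
  ("water cooling thermal liquid immersion heat evaporation drought reservoir gallons cubic", "Cooling & Water Use"),
  ("nuclear renewable solar wind carbon emissions clean green climate sustainability net zero", "Clean Energy & Sustainability"),
  ("data center infrastructure cloud server hardware rack facility hyperscale campus", "Data Center Infrastructure"),
  ("ai model training inference llm gpu compute nvidia chip accelerator transformer language", "AI Compute & Models"),
  ("quantum qubit qubits superposition entanglement decoherence fault logical error correction ibm google", "Quantum Computing"),
  ("drug protein gene genome clinical trial cancer therapy mrna vaccine biotech pharma disease", "Biotech & Health"),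
  ("policy regulation government law standard congress eu act bill rule compliance regulatory", "Policy & Regulation"),
  ("market billion million investment revenue funding startup ipo valuation growth percent forecast", "Market & Economic Trends"),
  ("security cyber attack breach vulnerability encryption threat malware ransomware phishing", "Cybersecurity"),
  ("space satellite rocket orbit nasa spacex lunar mars launch payload constellation", "Space Technology"),
  ("robot autonomous automation drone vehicle manufacturing warehouse arm sensor lidar", "Robotics & Automation"),
  ("research study paper journal university laboratory experiment discovery breakthrough findings", "Research & Science")]

def infer_cluster_label_py_alt (keywords : List String) : String :=
  let index : PySem.Dict String (List String) :=
    pvLabelMapB.foldl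
      (fun d p => (PySem.Str.split₀ p.1).foldl (fun d t => d.insert t (d.getD t [] ++ [p.2])) d)
      PySem.Dict.empty
  let counts : PySem.Dict String Int :=
    (PySem.Set.ofList (PySem.List.slice keywords none (some 8))).foldl
      (fun c kw => (index.getD kw []).foldl (fun c label => c.insert label (c.getD label 0 + 1)) c)
      PySem.Dict.empty
  let scores : List Int := pvLabelMapB.map (fun p => counts.getD p.2 0)
  let best : Int := (PySem.List.max? scores (fun x => x)).getD 0
  let fb : String :=
    if keywords ≠ [] then
      let clean := PySem.List.slice (keywords.filter (fun k => 4 < PySem.Str.len k)) none (some 2)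
      if clean ≠ [] then PySem.Str.join " & " (clean.map pvTitle) else "Emerging Trends"
    else "Emerging Trends"
  if 0 < best then
    match (pvLabelMapB.zip scores).find? (fun q => q.2 == best) with
    | some q => q.1.2
    | none => fb
  else fb

-- ===== PRECONDITION & SPEC =====
def Spec_infer_cluster_label_py (keywords : List String) (out : String) : Prop := out = infer_cluster_label_py_alt keywords
instance (keywords : List String) (out : String) : Decidable (Spec_infer_cluster_label_py keywords out) := by unfold Spec_infer_cluster_label_py; infer_instance

-- ===== CLAIM (what is proved, stated in full; the proofs are below) =====
def Claim_equal_infer_cluster_label_py : Prop := ∀ (keywords : List String), Dom_infer_cluster_label_py keywords → Spec_infer_cluster_label_py keywords (infer_cluster_label_py keywords)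

-- ===== LEMMAS AND PROOFS =====

-- B's table split into A's: the two tables list the same term sets and labels
theorem pv_mapB : pvLabelMapB.map (fun p => (PySem.Str.split₀ p.1, p.2)) = pvLabelMap := by decide

-- empty dict lookup
theorem pv_getD_empty {ν : Type} (k : String) (d0 : ν) :
    (PySem.Dict.empty (κ := String)).getD k d0 = d0 := by
  simp [PySem.Dict.empty, PySem.Dict.getD, PySem.Dict.get?]

-- inner index fold: entry for k gains one copy of lbl per occurrence of k in ts
theorem pv_inner_getD (ts : List String) (d : PySem.Dict String (List String)) (lbl k : String) :
    ((ts.foldl (fun d t => d.insert t (d.getD t [] ++ [lbl])) d)).getD k []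
      = d.getD k [] ++ List.replicate (ts.count k) lbl := by
  induction ts generalizing d with
  | nil => simp
  | cons t ts ih =>
    simp only [List.foldl_cons, ih, PySem.Dict.getD_insert, List.count_cons]
    by_cases h : k = t
    · subst h; simp [List.replicate_succ]
    · simp [h, Ne.symm h]

-- the whole inverted index, as a flatMap over A's table
theorem pv_invert_getD (k : String) :
    (pvLabelMapB.foldl
      (fun d p => (PySem.Str.split₀ p.1).foldl (fun d t => d.insert t (d.getD t [] ++ [p.2])) d)
      PySem.Dict.empty).getD k []
      = pvLabelMap.flatMap (fun p => List.replicate (p.1.count k) p.2) := by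
  have hfold : pvLabelMapB.foldl
      (fun d p => (PySem.Str.split₀ p.1).foldl (fun d t => d.insert t (d.getD t [] ++ [p.2])) d)
      PySem.Dict.empty
    = pvLabelMap.foldl
        (fun d p => p.1.foldl (fun d t => d.insert t (d.getD t [] ++ [p.2])) d)
        PySem.Dict.empty := by
    rw [← pv_mapB, List.foldl_map]
  rw [hfold]
  suffices h : ∀ (lm : List (List String × String)) (d : PySem.Dict String (List String)),
      (lm.foldl (fun d p => p.1.foldl (fun d t => d.insert t (d.getD t [] ++ [p.2])) d) d).getD k []
        = d.getD k [] ++ lm.flatMap (fun p => List.replicate (p.1.count k) p.2) by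
    simpa [pv_getD_empty] using h pvLabelMap PySem.Dict.empty
  intro lm
  induction lm with
  | nil => simp
  | cons p lm ih =>
    intro d
    simp [List.foldl_cons, ih, pv_inner_getD, List.flatMap_cons]

-- count of a label in the inverted-index entry, when labels are distinct
theorem pv_count_flatMap (lm : List (List String × String)) (p : List String × String) (k : String)
    (hp : p ∈ lm) (hnd : (lm.map Prod.snd).Nodup) :
    (lm.flatMap (fun q => List.replicate (q.1.count k) q.2)).count p.2 = p.1.count k := by
  induction lm with
  | nil => cases hp
  | cons q lm ih =>
    simp only [List.map_cons, List.nodup_cons] at hnd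
    simp only [List.flatMap_cons, List.count_append]
    rcases List.mem_cons.mp hp with h | h
    · subst h
      have : (lm.flatMap (fun q => List.replicate (q.1.count k) q.2)).count p.2 = 0 := by
        rw [List.count_eq_zero]
        intro hmem
        rcases List.mem_flatMap.mp hmem with ⟨r, hr, hrep⟩
        exact hnd.1 (List.mem_map.mpr ⟨r, hr, (List.eq_of_mem_replicate hrep).symm⟩)
      simp [this]
    · simp only [List.count_replicate, ih h hnd.2]
      have hne : ¬ q.2 = p.2 := by
        intro he
        exact hnd.1 (by rw [he]; exact List.mem_map.mpr ⟨p, h, rfl⟩)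
      simp [hne]

-- counter increment loop
theorem pv_incr_getD (ls : List String) (c : PySem.Dict String Int) (L : String) :
    (ls.foldl (fun c lbl => c.insert lbl (c.getD lbl 0 + 1)) c).getD L 0
      = c.getD L 0 + (ls.count L : Int) := by
  induction ls generalizing c with
  | nil => simp
  | cons l ls ih =>
    simp only [List.foldl_cons, ih, PySem.Dict.getD_insert, List.count_cons]
    by_cases h : L = l
    · subst h; simp; ring
    · simp [h, Ne.symm h]

-- the tally loop, for one label L whose per-term vote is given by terms.count
theorem pv_tally_getD (idx : PySem.Dict String (List String)) (terms : List String) (L : String)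
    (h : ∀ k, (idx.getD k []).count L = terms.count k) :
    ∀ (kws : List String) (c : PySem.Dict String Int),
      (kws.foldl (fun c kw => (idx.getD kw []).foldl
          (fun c label => c.insert label (c.getD label 0 + 1)) c) c).getD L 0
        = c.getD L 0 + ((kws.map (fun k => (terms.count k : Int))).sum) := by
  intro kws
  induction kws with
  | nil => simp
  | cons kw kws ih =>
    intro c
    simp only [List.foldl_cons, ih, pv_incr_getD, h, List.map_cons, List.sum_cons]
    ring

-- per-pair: B's counter value = A's intersection size
theorem pv_score_eq (p : List String × String) (hp : p ∈ pvLabelMap) (kws : List String) :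
    ((kws.foldl (fun c kw =>
        ((pvLabelMapB.foldl
          (fun d p => (PySem.Str.split₀ p.1).foldl (fun d t => d.insert t (d.getD t [] ++ [p.2])) d)
          PySem.Dict.empty).getD kw []).foldl
        (fun c label => c.insert label (c.getD label 0 + 1)) c) PySem.Dict.empty).getD p.2 0)
      = PySem.Set.len (PySem.Set.inter kws p.1) := by
  have hnd : (pvLabelMap.map Prod.snd).Nodup := by decide
  have hterms : p.1.Nodup := by
    fin_cases hp <;> decide
  have hvote : ∀ k, ((pvLabelMapB.foldl
      (fun d p => (PySem.Str.split₀ p.1).foldl (fun d t => d.insert t (d.getD t [] ++ [p.2])) d)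
      PySem.Dict.empty).getD k []).count p.2 = p.1.count k := by
    intro k
    rw [pv_invert_getD]
    exact pv_count_flatMap pvLabelMap p k hp hnd
  rw [pv_tally_getD _ p.1 p.2 hvote kws PySem.Dict.empty, pv_getD_empty]
  have hcount : ∀ k, (p.1.count k : Int) = if p.1.contains k then 1 else 0 := by
    intro k
    by_cases hk : k ∈ p.1
    · rw [List.count_eq_one_of_mem hterms hk]; simp [hk]
    · simp [hk, List.count_eq_zero_of_not_mem hk]
  simp only [hcount]
  rw [PySem.List.sum_map_ite_one_zero]
  simp only [PySem.Set.len, PySem.Set.inter, List.countP_eq_length_filter]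
  rw [zero_add]
  norm_cast

-- ===== generic facts about A's first-strict-winner fold =====

-- the running score is the running max
theorem pv_fold_snd {α : Type} (f : α → Int) (lab : α → String) :
    ∀ (l : List α) (st : String × Int),
      (l.foldl (fun st p => if st.2 < f p then (lab p, f p) else st) st).2
        = l.foldl (fun m p => max m (f p)) st.2 := by
  intro l
  induction l with
  | nil => intro st; rfl
  | cons p l ih =>
    intro st
    simp only [List.foldl_cons, ih]
    by_cases h : st.2 < f p
    · simp [h, max_eq_right (le_of_lt h)]
    · simp [h, max_eq_left (le_of_not_gt h)]

-- the running score never decreases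
theorem pv_fold_mono {α : Type} (f : α → Int) (lab : α → String)
    (l : List α) (st : String × Int) :
    st.2 ≤ (l.foldl (fun st p => if st.2 < f p then (lab p, f p) else st) st).2 := by
  rw [pv_fold_snd]
  exact (PySem.List.le_foldl_max_int l f st.2).1

-- if the score did not increase, the state never changed
theorem pv_fold_stay {α : Type} (f : α → Int) (lab : α → String) :
    ∀ (l : List α) (st : String × Int),
      (l.foldl (fun st p => if st.2 < f p then (lab p, f p) else st) st).2 ≤ st.2 →
      l.foldl (fun st p => if st.2 < f p then (lab p, f p) else st) st = st := by
  intro l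
  induction l with
  | nil => intro st _; rfl
  | cons p l ih =>
    intro st hle
    by_cases h : st.2 < f p
    · exfalso
      have hm := pv_fold_mono f lab l (lab p, f p)
      simp only [List.foldl_cons, if_pos h] at hle
      exact absurd (le_trans hm hle) (not_le.mpr h)
    · simp only [List.foldl_cons, if_neg h] at hle ⊢
      exact ih st hle

-- if the score did increase, the winner is the first element attaining the final score
theorem pv_fold_find {α : Type} (f : α → Int) (lab : α → String) :
    ∀ (l : List α) (st : String × Int),
      st.2 < (l.foldl (fun st p => if st.2 < f p then (lab p, f p) else st) st).2 →
      ∃ q, l.find? (fun p => f p == (l.foldl (fun st p => if st.2 < f p then (lab p, f p) else st) st).2) = some q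
        ∧ lab q = (l.foldl (fun st p => if st.2 < f p then (lab p, f p) else st) st).1 := by
  intro l
  induction l with
  | nil => intro st h; exact absurd h (lt_irrefl _)
  | cons p l ih =>
    intro st hlt
    simp only [List.foldl_cons] at hlt ⊢
    by_cases h : st.2 < f p
    · rw [if_pos h] at hlt ⊢
      by_cases h2 : (f p : Int) < (l.foldl (fun st p => if st.2 < f p then (lab p, f p) else st) (lab p, f p)).2
      · rcases ih (lab p, f p) h2 with ⟨q, hq, hlab⟩
        refine ⟨q, ?_, hlab⟩
        rw [List.find?_cons]
        have : ¬ (f p == (l.foldl (fun st p => if st.2 < f p then (lab p, f p) else st) (lab p, f p)).2) = true := by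
          simp only [beq_iff_eq]
          exact ne_of_lt h2
        simp only [this]
        exact hq
      · have heq : l.foldl (fun st p => if st.2 < f p then (lab p, f p) else st) (lab p, f p) = (lab p, f p) :=
          pv_fold_stay f lab l (lab p, f p) (le_of_not_gt h2)
        refine ⟨p, ?_, by rw [heq]⟩
        rw [List.find?_cons, heq]
        simp
    · rw [if_neg h] at hlt ⊢
      rcases ih st hlt with ⟨q, hq, hlab⟩
      refine ⟨q, ?_, hlab⟩
      rw [List.find?_cons]
      have hple : f p ≤ st.2 := le_of_not_gt h
      have : ¬ (f p == (l.foldl (fun st p => if st.2 < f p then (lab p, f p) else st) st).2) = true := by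
        simp only [beq_iff_eq]
        intro he
        exact absurd hlt (by rw [← he]; exact not_lt.mpr hple)
      simp only [this]
      exact hq

-- Python max(xs, default=0) on a nonnegative list is the running max from 0
theorem pv_best_eq (ls : List Int) (h : ∀ x ∈ ls, 0 ≤ x) :
    (PySem.List.max? ls (fun x => x)).getD 0 = ls.foldl max 0 := by
  cases ls with
  | nil => rfl
  | cons x t =>
    rw [PySem.List.max?_id_cons]
    have hx : max 0 x = x := max_eq_right (h x (List.mem_cons_self))
    simp [List.foldl_cons, hx]

-- find? respects pointwise-equal predicates on members
theorem pv_find?_congr {α : Type} (p q : α → Bool) :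
    ∀ (l : List α), (∀ x ∈ l, p x = q x) → l.find? p = l.find? q := by
  intro l
  induction l with
  | nil => intro _; rfl
  | cons x t ih =>
    intro h
    rw [List.find?_cons, List.find?_cons, h x (List.mem_cons_self)]
    cases q x
    · exact ih (fun y hy => h y (List.mem_cons_of_mem _ hy))
    · rfl

-- proof-side names for the two ports' intermediate values
def pvScore (K : List String) (p : List String × String) : Int :=
  PySem.Set.len (PySem.Set.inter K p.1)

def pvR (K : List String) : String × Int :=
  pvLabelMap.foldl (fun st p => if st.2 < pvScore K p then (p.2, pvScore K p) else st)
    ("Emerging Trends", 0)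

def pvIdx : PySem.Dict String (List String) :=
  pvLabelMapB.foldl
    (fun d p => (PySem.Str.split₀ p.1).foldl (fun d t => d.insert t (d.getD t [] ++ [p.2])) d)
    PySem.Dict.empty

def pvCounts (K : List String) : PySem.Dict String Int :=
  K.foldl (fun c kw => (pvIdx.getD kw []).foldl
    (fun c label => c.insert label (c.getD label 0 + 1)) c) PySem.Dict.empty

def pvScores (K : List String) : List Int :=
  pvLabelMapB.map (fun p => (pvCounts K).getD p.2 0)

def pvBest (K : List String) : Int := (PySem.List.max? (pvScores K) (fun x => x)).getD 0

-- zip of a list with its own map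
theorem pv_zip_map {α β : Type} (g : α → β) :
    ∀ (l : List α), l.zip (l.map g) = l.map (fun x => (x, g x)) := by
  intro l
  induction l with
  | nil => rfl
  | cons x t ih => simp [List.zip_cons_cons, ih]

-- B's counter agrees with A's intersection score on every table row
theorem pv_counts_eq (K : List String) (p : List String × String) (hp : p ∈ pvLabelMap) :
    (pvCounts K).getD p.2 0 = pvScore K p :=
  pv_score_eq p hp K

-- B's score list is A's score over A's table
theorem pv_scores_eq (K : List String) : pvScores K = pvLabelMap.map (pvScore K) := by
  rw [pvScores, ← pv_mapB, List.map_map]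
  refine List.map_congr_left (fun p hp => ?_)
  exact pv_counts_eq K _ (by rw [← pv_mapB]; exact List.mem_map_of_mem hp)

-- scores are nonnegative
theorem pv_scores_nonneg (K : List String) : ∀ x ∈ pvScores K, 0 ≤ x := by
  rw [pv_scores_eq]
  intro x hx
  rcases List.mem_map.mp hx with ⟨p, _, rfl⟩
  simp [pvScore, PySem.Set.len]

-- B's best = A's final running score
theorem pv_best_R (K : List String) : pvBest K = (pvR K).2 := by
  rw [pvBest, pv_best_eq _ (pv_scores_nonneg K), pv_scores_eq, pvR,
      pv_fold_snd (pvScore K) Prod.snd, List.foldl_map]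

-- ===== VERDICT (by name: the statement is the Claim_ definition above) =====
theorem infer_cluster_label_py_spec : Claim_equal_infer_cluster_label_py := by
  intro keywords _
  unfold Spec_infer_cluster_label_py infer_cluster_label_py infer_cluster_label_py_alt
  show (if (pvR (PySem.Set.ofList (PySem.List.slice keywords none (some 8)))).2 = 0 ∧ keywords ≠ [] then
          if PySem.List.slice (keywords.filter (fun k => 4 < PySem.Str.len k)) none (some 2) ≠ [] then
            PySem.Str.join " & " ((PySem.List.slice (keywords.filter (fun k => 4 < PySem.Str.len k)) none (some 2)).map pvTitle)
          else (pvR (PySem.Set.ofList (PySem.List.slice keywords none (some 8)))).1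
        else (pvR (PySem.Set.ofList (PySem.List.slice keywords none (some 8)))).1)
      = (if 0 < pvBest (PySem.Set.ofList (PySem.List.slice keywords none (some 8))) then
          match (pvLabelMapB.zip (pvScores (PySem.Set.ofList (PySem.List.slice keywords none (some 8))))).find?
              (fun q => q.2 == pvBest (PySem.Set.ofList (PySem.List.slice keywords none (some 8)))) with
          | some q => q.1.2
          | none =>
            if keywords ≠ [] then
              if PySem.List.slice (keywords.filter (fun k => 4 < PySem.Str.len k)) none (some 2) ≠ [] then
                PySem.Str.join " & " ((PySem.List.slice (keywords.filter (fun k => 4 < PySem.Str.len k)) none (some 2)).map pvTitle)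
              else "Emerging Trends"
            else "Emerging Trends"
        else
          if keywords ≠ [] then
            if PySem.List.slice (keywords.filter (fun k => 4 < PySem.Str.len k)) none (some 2) ≠ [] then
              PySem.Str.join " & " ((PySem.List.slice (keywords.filter (fun k => 4 < PySem.Str.len k)) none (some 2)).map pvTitle)
            else "Emerging Trends"
          else "Emerging Trends")
  set K : List String := PySem.Set.ofList (PySem.List.slice keywords none (some 8)) with hK
  by_cases hpos : 0 < pvBest K
  · -- a label won: A returns the fold's label, B the first row attaining the max count
    have hposR : 0 < (pvR K).2 := by rw [← pv_best_R]; exact hpos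
    have hguard : ¬((pvR K).2 = 0 ∧ keywords ≠ []) := by
      rintro ⟨h0, -⟩; rw [h0] at hposR; exact lt_irrefl _ hposR
    rw [if_neg hguard, if_pos hpos]
    rcases pv_fold_find (pvScore K) Prod.snd pvLabelMap ("Emerging Trends", 0) hposR
      with ⟨q, hfind, hlab⟩
    change pvLabelMap.find? (fun p => pvScore K p == (pvR K).2) = some q at hfind
    change q.2 = (pvR K).1 at hlab
    have hfind' : pvLabelMap.find? (fun p => (pvCounts K).getD p.2 0 == pvBest K) = some q := by
      rw [← hfind]
      refine (pv_find?_congr _ _ pvLabelMap (fun p hp => ?_)).symm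
      rw [pv_counts_eq K p hp, pv_best_R]
    have hm := List.find?_map (f := fun p : String × String => (PySem.Str.split₀ p.1, p.2))
      (l := pvLabelMapB) (p := fun q : List String × String => (pvCounts K).getD q.2 0 == pvBest K)
    have hmapfind : (pvLabelMapB.find? (fun p => (pvCounts K).getD p.2 0 == pvBest K)).map
        (fun p => (PySem.Str.split₀ p.1, p.2)) = some q :=
      hm.symm.trans (by rw [pv_mapB]; exact hfind')
    rcases Option.map_eq_some_iff.mp hmapfind with ⟨p0, hp0, hφ⟩
    have hz := List.find?_map (f := fun x : String × String => (x, (pvCounts K).getD x.2 0))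
      (l := pvLabelMapB) (p := fun q : (String × String) × Int => q.2 == pvBest K)
    have hzip : (pvLabelMapB.zip (pvScores K)).find? (fun q => q.2 == pvBest K)
        = some (p0, (pvCounts K).getD p0.2 0) := by
      rw [pvScores, pv_zip_map, hz]
      exact congrArg (Option.map _) hp0
    rw [hzip]
    show (pvR K).1 = p0.2
    have hp2 : p0.2 = q.2 := by rw [← hφ]
    rw [hp2, hlab]
  · -- no label scored: the fold never moved, both sides take the fallback
    have hR2 : (pvR K).2 = 0 := by
      have h1 : 0 ≤ (pvR K).2 := pv_fold_mono (pvScore K) Prod.snd pvLabelMap ("Emerging Trends", 0)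
      have h2 : ¬ 0 < (pvR K).2 := by rw [← pv_best_R]; exact hpos
      omega
    have hstay : pvR K = ("Emerging Trends", 0) :=
      pv_fold_stay (pvScore K) Prod.snd pvLabelMap ("Emerging Trends", 0) (le_of_eq hR2)
    rw [if_neg hpos, hstay]
    by_cases hk : keywords ≠ []
    · have hg : (("Emerging Trends", 0) : String × Int).2 = 0 ∧ keywords ≠ [] := ⟨rfl, hk⟩
      rw [if_pos hg, if_pos hk]
    · simp [hk]
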